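-- pv_equiv track=rewrite | github.com/Buscedv/Ask | ask_lang/transpiler/utilities/lexer_utils.py | reformat_line
-- ===== SOURCE A (Python) =====
-- from typing import List, Tuple
--
-- def add_chunk(chunks: list, is_string: bool, code: str) -> Tuple[list, str, bool]:
-- 	chunks.append({
-- 		'is_string': is_string,
-- 		'code': code
-- 	})
--
-- 	is_string = True
--
-- 	if code[-1] == '\n':
-- 		is_string = False
--
-- 	return chunks, '', is_string
--
-- def reformat_line(statement: str) -> str:
-- 	statement = statement.replace("'", '"')
--
-- 	if statement and statement[-1] != '\n':
-- 		statement += '\n'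
--
-- 	chunks = []
-- 	is_string = False
-- 	tmp = ''
--
-- 	# Groups the code into chunks that are labeled as strings and not strings.
-- 	# This way spaces->tabs conversion etc. doesn't interfere with spaces inside strings.
-- 	for char in statement:
-- 		tmp += char
--
-- 		if char == '"' and is_string:
-- 			chunks, tmp, is_string = add_chunk(chunks, True, tmp)
-- 			is_string = False
-- 		elif char in ['"', '\n']:
-- 			chunks, tmp, is_string = add_chunk(chunks, False, tmp)
--
-- 	# Fixes indentation based on the generated chucks.
-- 	statement = ''
-- 	for chunk in chunks:
-- 		if not chunk['is_string']:
-- 			chunk['code'] = chunk['code'] \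
-- 				.replace('    ', '\t') \
-- 				.replace('  ', '\t') \
-- 				.replace(' (', '(')
--
-- 		statement += chunk['code']
--
-- 	return statement
-- ===== SOURCE B (Python) =====
-- def _fix(code: str) -> str:
-- 	return code.replace('    ', '\t').replace('  ', '\t').replace(' (', '(')
--
-- def reformat_line(statement: str) -> str:
-- 	statement = statement.replace("'", '"')
--
-- 	if statement and statement[-1] != '\n':
-- 		statement += '\n'
--
-- 	# A newline always resets the string state, so each line can be handled
-- 	# independently: quote-split pieces alternate code/string by parity.
-- 	out = []
-- 	for line in statement.split('\n')[:-1]: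
-- 		pieces = line.split('"')
-- 		for i, piece in enumerate(pieces[:-1]):
-- 			out.append(piece + '"' if i % 2 else _fix(piece + '"'))
-- 		out.append(_fix(pieces[-1] + '\n'))
-- 	return ''.join(out)
-- ===== Notes on version B (the rewrite author's own statement) =====
-- stated objective: simpler
-- what changed: A runs a character-by-character state machine that builds a list of labeled chunk dicts via an add_chunk helper and then post-processes them; B splits the normalized text into lines and splits each line at quote characters, where the split pieces alternate code/string by index parity (a newline always resets the string state), emitting each piece directly.
import Mathlib
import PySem

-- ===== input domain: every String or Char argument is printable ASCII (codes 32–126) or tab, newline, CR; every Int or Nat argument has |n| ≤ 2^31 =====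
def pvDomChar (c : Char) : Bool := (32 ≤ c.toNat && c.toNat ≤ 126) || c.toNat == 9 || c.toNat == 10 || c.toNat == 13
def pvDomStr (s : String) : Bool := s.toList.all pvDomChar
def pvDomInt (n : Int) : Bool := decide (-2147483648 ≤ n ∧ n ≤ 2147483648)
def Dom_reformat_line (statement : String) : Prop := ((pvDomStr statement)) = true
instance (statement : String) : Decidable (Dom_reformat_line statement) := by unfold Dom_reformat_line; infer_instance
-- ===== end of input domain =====

-- B replaces A's character-by-character state machine (chunk list + add_chunk helper) by a
-- per-line, quote-split pass: split pieces alternate code/string by parity (objective: simpler).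

-- ===== PORT A =====
-- add_chunk: `code` is nonempty at every call site (tmp has just received a char),
-- so Python's code[-1] is exactly PySem.List.pyGet? code (-1) here.
def pvAddChunk (chunks : List (Bool × List Char)) (is_string : Bool) (code : List Char) :
    List (Bool × List Char) × List Char × Bool :=
  let chunks := chunks ++ [(is_string, code)]
  let is_string := if PySem.List.pyGet? code (-1) == some '\n' then false else true
  (chunks, [], is_string)

def reformat_line (statement : String) : String :=
  let s := PySem.Chars.replace statement.toList ['\''] ['"']
  let s := if s ≠ [] ∧ PySem.List.pyGet? s (-1) ≠ some '\n' then s ++ ['\n'] else s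
  let res := s.foldl (fun st char =>
      let chunks := st.1
      let is_string := st.2.1
      let tmp := st.2.2 ++ [char]
      if char == '"' && is_string then
        let r := pvAddChunk chunks true tmp
        (r.1, false, r.2.1)
      else if char == '"' || char == '\n' then
        let r := pvAddChunk chunks false tmp
        (r.1, r.2.2, r.2.1)
      else (chunks, is_string, tmp))
    (([] : List (Bool × List Char)), false, ([] : List Char))
  let out := res.1.foldl (fun acc chunk =>
      let code := if !chunk.1 then
          PySem.Chars.replace (PySem.Chars.replace (PySem.Chars.replace chunk.2
            [' ',' ',' ',' '] ['\t']) [' ',' '] ['\t']) [' ','('] ['(']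
        else chunk.2
      acc ++ code) []
  String.mk out

-- ===== PORT B =====
def pvFix (code : List Char) : List Char :=
  PySem.Chars.replace (PySem.Chars.replace (PySem.Chars.replace code
    [' ',' ',' ',' '] ['\t']) [' ',' '] ['\t']) [' ','('] ['(']

-- pieces (a str.split result) is never empty, so Python's pieces[-1] is exact via pyGet?.
def reformat_line_alt (statement : String) : String :=
  let s := PySem.Chars.replace statement.toList ['\''] ['"']
  let s := if s ≠ [] ∧ PySem.List.pyGet? s (-1) ≠ some '\n' then s ++ ['\n'] else s
  let out := ((PySem.Chars.splitOn s ['\n']).dropLast).foldl (fun acc line =>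
      let pieces := PySem.Chars.splitOn line ['"']
      let acc := (PySem.List.enumerate pieces.dropLast).foldl (fun acc ip =>
          acc ++ [if PySem.Int.mod ip.1 2 != 0 then ip.2 ++ ['"'] else pvFix (ip.2 ++ ['"'])]) acc
      acc ++ [pvFix ((PySem.List.pyGet? pieces (-1)).getD [] ++ ['\n'])]) []
  String.mk (PySem.Chars.join [] out)

-- ===== PRECONDITION & SPEC =====
def Spec_reformat_line (statement : String) (out : String) : Prop := out = reformat_line_alt statement
instance (statement : String) (out : String) : Decidable (Spec_reformat_line statement out) := by unfold Spec_reformat_line; infer_instance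

-- ===== CLAIM (what is proved, stated in full; the proofs are below) =====
def Claim_equal_reformat_line : Prop := ∀ (statement : String), Dom_reformat_line statement → Spec_reformat_line statement (reformat_line statement)

-- ===== LEMMAS AND PROOFS =====

def pvStepA (st : List (Bool × List Char) × Bool × List Char) (char : Char) :
    List (Bool × List Char) × Bool × List Char :=
  let chunks := st.1
  let is_string := st.2.1
  let tmp := st.2.2 ++ [char]
  if char == '"' && is_string then
    let r := pvAddChunk chunks true tmp
    (r.1, false, r.2.1)
  else if char == '"' || char == '\n' then
    let r := pvAddChunk chunks false tmp
    (r.1, r.2.2, r.2.1)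
  else (chunks, is_string, tmp)

theorem pvGetNegOne {α : Type} (l : List α) : PySem.List.pyGet? l (-1) = l.getLast? := by
  cases l with
  | nil => rfl
  | cons a t =>
    simp [PySem.List.pyGet?, PySem.List.pyIdx?, List.getLast?_eq_getElem?]

def pvSplit1 (c : Char) : List Char → List Char → List (List Char)
  | pre, [] => [pre]
  | pre, x :: xs => if x = c then pre :: pvSplit1 c [] xs else pvSplit1 c (pre ++ [x]) xs

theorem pvSplitOn_go (c : Char) (fuel : Nat) : ∀ (l cur : List Char) (accs : List (List Char)),
    l.length < fuel →
    PySem.Chars.splitOn.go [c] fuel l cur accs = accs.reverse ++ pvSplit1 c cur.reverse l := by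
  induction fuel with
  | zero => intro l cur accs h; omega
  | succ n ih =>
    intro l cur accs h
    cases l with
    | nil => simp [PySem.Chars.splitOn.go, pvSplit1]
    | cons x xs =>
      rw [PySem.Chars.splitOn.go]
      by_cases hx : x = c
      · subst hx
        have hpre : List.isPrefixOf [x] (x :: xs) = true := by simp [List.isPrefixOf]
        rw [hpre]
        simp only [if_true, List.length_singleton, List.drop_succ_cons, List.drop_zero]
        rw [ih xs [] (cur.reverse :: accs) (by simpa using Nat.lt_of_succ_lt_succ h)]
        simp [pvSplit1]
      · have hpre : List.isPrefixOf [c] (x :: xs) = false := by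
          simp [List.isPrefixOf]; exact fun h => absurd h.symm hx
        rw [hpre]
        rw [ih xs (x :: cur) accs (by simpa using Nat.lt_of_succ_lt_succ h)]
        simp [pvSplit1, hx]

theorem pvSplitOn_eq (c : Char) (s : List Char) :
    PySem.Chars.splitOn s [c] = pvSplit1 c [] s := by
  have := pvSplitOn_go c (s.length + 1) s [] [] (by omega)
  simpa [PySem.Chars.splitOn] using this

theorem pvSplit1_free (c : Char) (l : List Char) : ∀ (pre : List Char), c ∉ pre →
    ∀ q ∈ pvSplit1 c pre l, c ∉ q := by
  induction l with
  | nil => intro pre hp q hq; simp [pvSplit1] at hq; simpa [hq] using hp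
  | cons x xs ih =>
    intro pre hp q hq
    by_cases hx : x = c
    · subst hx
      simp [pvSplit1] at hq
      rcases hq with h | h
      · simpa [h] using hp
      · exact ih [] (by simp) q h
    · rw [pvSplit1, if_neg hx] at hq
      exact ih (pre ++ [x]) (by simp [hp]; exact fun h => hx h.symm) q hq

theorem pvSplit1_other (c d : Char) (l : List Char) : ∀ (pre : List Char), d ∉ pre → d ∉ l →
    ∀ q ∈ pvSplit1 c pre l, d ∉ q := by
  induction l with
  | nil => intro pre hp hl q hq; simp [pvSplit1] at hq; simpa [hq] using hp
  | cons x xs ih =>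
    intro pre hp hl q hq
    by_cases hx : x = c
    · subst hx
      simp [pvSplit1] at hq
      rcases hq with h | h
      · simpa [h] using hp
      · exact ih [] (by simp) (by simp at hl; exact hl.2) q h
    · rw [pvSplit1, if_neg hx] at hq
      simp at hl
      exact ih (pre ++ [x]) (by simp [hp]; exact hl.1) hl.2 q hq

theorem pvSplit1_ne_nil (c : Char) (l : List Char) : ∀ pre, pvSplit1 c pre l ≠ [] := by
  induction l with
  | nil => intro pre; simp [pvSplit1]
  | cons x xs ih => intro pre; rw [pvSplit1]; split <;> simp [ih]

theorem pvSplit1_intercalate (c : Char) (l : List Char) : ∀ pre,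
    List.intercalate [c] (pvSplit1 c pre l) = pre ++ l := by
  induction l with
  | nil => intro pre; simp [pvSplit1, List.intercalate]
  | cons x xs ih =>
    intro pre
    by_cases hx : x = c
    · subst hx
      rw [pvSplit1, if_pos rfl]
      have hne := pvSplit1_ne_nil x xs []
      cases h : pvSplit1 x [] xs with
      | nil => exact absurd h hne
      | cons q qs =>
        have := ih []
        rw [h] at this
        simp [List.intercalate] at this ⊢
        simp [this]
    · rw [pvSplit1, if_neg hx, ih]
      simp

-- reference chunker: the state machine of A's first loop, chunk list only
def pvChunks (b : Bool) (tmp : List Char) : List Char → List (Bool × List Char)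
  | [] => []
  | ch :: cs =>
    if ch = '"' ∧ b = true then (true, tmp ++ [ch]) :: pvChunks false [] cs
    else if ch = '"' ∨ ch = '\n' then
      (false, tmp ++ [ch]) :: pvChunks (if ch = '\n' then false else true) [] cs
    else pvChunks b (tmp ++ [ch]) cs

theorem pvFoldA (s : List Char) : ∀ (chunks : List (Bool × List Char)) (b : Bool) (tmp : List Char),
    (s.foldl pvStepA (chunks, b, tmp)).1 = chunks ++ pvChunks b tmp s := by
  induction s with
  | nil => intro chunks b tmp; simp [pvChunks]
  | cons ch cs ih =>
    intro chunks b tmp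
    rw [List.foldl_cons]
    by_cases hq : ch = '"'
    · subst hq
      cases b with
      | true =>
        have : pvStepA (chunks, true, tmp) '"' = (chunks ++ [(true, tmp ++ ['"'])], false, []) := by
          simp [pvStepA, pvAddChunk]
        rw [this, ih, pvChunks]
        simp
      | false =>
        have : pvStepA (chunks, false, tmp) '"' = (chunks ++ [(false, tmp ++ ['"'])], true, []) := by
          simp [pvStepA, pvAddChunk, pvGetNegOne]
        rw [this, ih, pvChunks]
        simp
    · by_cases hn : ch = '\n'
      · subst hn
        have : pvStepA (chunks, b, tmp) '\n' = (chunks ++ [(false, tmp ++ ['\n'])], false, []) := by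
          simp [pvStepA, pvAddChunk, pvGetNegOne]
        rw [this, ih, pvChunks]
        simp [hq]
      · have : pvStepA (chunks, b, tmp) ch = (chunks, b, tmp ++ [ch]) := by
          simp [pvStepA, hq, hn]
        rw [this, ih, pvChunks]
        simp [hq, hn]

theorem pvChunks_consume (p : List Char) : ∀ (b : Bool) (tmp cs : List Char), '"' ∉ p → '\n' ∉ p →
    pvChunks b tmp (p ++ cs) = pvChunks b (tmp ++ p) cs := by
  induction p with
  | nil => intro b tmp cs _ _; simp
  | cons x xs ih =>
    intro b tmp cs h1 h2
    have hx : x ≠ '"' := by rintro rfl; exact h1 (by simp)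
    have hnl : x ≠ '\n' := by rintro rfl; exact h2 (by simp)
    rw [List.cons_append, pvChunks, if_neg (by simp [hx]), if_neg (by simp [hx, hnl])]
    rw [ih b (tmp ++ [x]) cs (fun h => h1 (by simp [h])) (fun h => h2 (by simp [h]))]
    simp

def pvItem (ip : Int × List Char) : Bool × List Char :=
  ((PySem.Int.mod ip.1 2 != 0), ip.2 ++ ['"'])

theorem pvParityFlip (n : Int) (hn : 0 ≤ n) :
    ((PySem.Int.mod (n+1) 2 != 0) : Bool) = !(PySem.Int.mod n 2 != 0) := by
  rw [PySem.Int.mod_eq_emod_of_pos (by omega), PySem.Int.mod_eq_emod_of_pos (by omega)]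
  rcases Int.emod_two_eq_zero_or_one n with h | h <;>
    simp [h] <;> omega

theorem pvPerLine (pieces : List (List Char)) :
    ∀ (p0 : List Char), (∀ q ∈ p0 :: pieces, '"' ∉ q ∧ '\n' ∉ q) →
    ∀ (n : Int), 0 ≤ n → ∀ (rest : List Char),
    pvChunks (PySem.Int.mod n 2 != 0) [] (List.intercalate ['"'] (p0 :: pieces) ++ '\n' :: rest)
      = (PySem.List.enumerate (p0 :: pieces).dropLast n).map pvItem
        ++ (false, (p0 :: pieces).getLast (by simp) ++ ['\n']) :: pvChunks false [] rest := by
  induction pieces with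
  | nil =>
    intro p0 hfree n hn rest
    have h := hfree p0 (by simp)
    rw [List.intercalate]
    simp
    rw [pvChunks_consume p0 _ [] _ h.1 h.2, pvChunks]
    simp [h.1]
  | cons q ps ih =>
    intro p0 hfree n hn rest
    have h0 := hfree p0 (by simp)
    have hic : List.intercalate ['"'] (p0 :: q :: ps) = p0 ++ '"' :: List.intercalate ['"'] (q :: ps) := by
      simp [List.intercalate]
    rw [hic, List.append_assoc, List.cons_append,
        pvChunks_consume p0 _ [] _ h0.1 h0.2, pvChunks]
    have hih := ih q (fun r hr => hfree r (by simp at hr ⊢; tauto)) (n+1) (by omega) rest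
    rw [pvParityFlip n hn] at hih
    cases hb : (PySem.Int.mod n 2 != 0 : Bool) with
    | true =>
      rw [if_pos (by simp)]
      rw [hb] at hih
      simp only [Bool.not_true] at hih
      rw [hih]
      simp [PySem.List.enumerate_cons, pvItem, hb, List.getLast_cons]
      have h2 := hb
      rw [show (PySem.Int.mod n 2) = n % 2 from PySem.Int.mod_eq_emod_of_pos (by omega)] at h2
      simp at h2
      omega
    | false =>
      rw [if_neg (by simp), if_pos (by simp)]
      rw [hb] at hih
      simp only [Bool.not_false] at hih
      simp only [if_neg (by decide : ¬('"' = '\n'))]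
      rw [hih]
      simp [PySem.List.enumerate_cons, pvItem, hb, List.getLast_cons]
      have h2 := hb
      rw [show (PySem.Int.mod n 2) = n % 2 from PySem.Int.mod_eq_emod_of_pos (by omega)] at h2
      simp at h2
      omega

theorem pvSplit1_split (c : Char) (p : List Char) : ∀ (pre rest : List Char), c ∉ p →
    pvSplit1 c pre (p ++ c :: rest) = (pre ++ p) :: pvSplit1 c [] rest := by
  induction p with
  | nil => intro pre rest _; simp [pvSplit1]
  | cons x xs ih =>
    intro pre rest h
    have hx : x ≠ c := by rintro rfl; exact h (by simp)
    rw [List.cons_append, pvSplit1, if_neg hx, ih (pre ++ [x]) rest (fun hm => h (by simp [hm]))]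
    simp

def pvRenderItem (chunk : Bool × List Char) : List Char :=
  if !chunk.1 then pvFix chunk.2 else chunk.2

def pvLineOut (line : List Char) : List (List Char) :=
  ((PySem.List.enumerate (pvSplit1 '"' [] line).dropLast 0).map pvItem).map pvRenderItem
    ++ [pvFix ((pvSplit1 '"' [] line).getLast?.getD [] ++ ['\n'])]

theorem pvIntercalateNil (l : List (List Char)) : List.intercalate [] l = l.flatten := by
  induction l with
  | nil => simp [List.intercalate]
  | cons a t ih =>
    cases t with
    | nil => simp [List.intercalate]
    | cons b u =>
      simp [List.intercalate, List.intersperse] at ih ⊢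
      simpa using ih

theorem pvTop (N : Nat) : ∀ (s : List Char), s.length ≤ N → (s = [] ∨ s.getLast? = some '\n') →
    (pvChunks false [] s).flatMap pvRenderItem
      = ((pvSplit1 '\n' [] s).dropLast).flatMap (fun line => (pvLineOut line).flatten) := by
  induction N with
  | zero =>
    intro s hl he
    have : s = [] := List.length_eq_zero_iff.mp (by omega)
    subst this
    simp [pvChunks, pvSplit1]
  | succ N ih =>
    intro s hl he
    rcases he with rfl | he
    · simp [pvChunks, pvSplit1]
    · -- decompose the first line
      have hmem : '\n' ∈ s := List.mem_of_getLast? he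
      set p : Char → Bool := fun c => c != '\n' with hp
      have hd : s.dropWhile p ≠ [] := by
        intro h0
        have := List.dropWhile_eq_nil_iff.mp h0 '\n' hmem
        simp [hp] at this
      set line := s.takeWhile p with hline
      have hlinefree : '\n' ∉ line := by
        intro hm
        have := List.mem_takeWhile_imp hm
        simp [hp] at this
      obtain ⟨h1, rest, hdrop⟩ : ∃ h rest, s.dropWhile p = h :: rest := by
        cases hds : s.dropWhile p with
        | nil => exact absurd hds hd
        | cons h t => exact ⟨h, t, rfl⟩
      have hh : h1 = '\n' := by
        have h2 := List.head_dropWhile_not p hd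
        rw [show (s.dropWhile p).head hd = h1 by simp [hdrop]] at h2
        simpa [hp] using h2
      have hs : s = line ++ '\n' :: rest := by
        rw [hline, ← hh, ← hdrop, List.takeWhile_append_dropWhile]
      have hrest_ends : rest = [] ∨ rest.getLast? = some '\n' := by
        cases hr : rest with
        | nil => exact Or.inl rfl
        | cons y ys =>
          right
          rw [hs, List.getLast?_append, hr, List.getLast?_cons_cons] at he
          obtain ⟨z, hz⟩ := Option.isSome_iff_exists.mp
            (List.getLast?_isSome.mpr (List.cons_ne_nil y ys))
          rw [hz] at he
          simp at he
          rw [hz, he]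
      -- pieces of the first line
      have hqfree : ∀ q ∈ pvSplit1 '"' [] line, '"' ∉ q ∧ '\n' ∉ q := fun q hq =>
        ⟨pvSplit1_free '"' line [] (by simp) q hq,
         pvSplit1_other '"' '\n' line [] (by simp) hlinefree q hq⟩
      obtain ⟨p0, ps, hps⟩ : ∃ p0 ps, pvSplit1 '"' [] line = p0 :: ps := by
        cases h : pvSplit1 '"' [] line with
        | nil => exact absurd h (pvSplit1_ne_nil _ _ _)
        | cons a t => exact ⟨_, _, rfl⟩
      have hinter : List.intercalate ['"'] (p0 :: ps) = line := by
        rw [← hps, pvSplit1_intercalate]; simp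
      have hPL := pvPerLine ps p0 (by rw [hps] at hqfree; exact hqfree) 0 (by omega) rest
      rw [hinter, show (PySem.Int.mod 0 2 != 0) = false by decide] at hPL
      have hrestlen : rest.length ≤ N := by
        have := congrArg List.length hs
        simp at this
        omega
      have hsplit : pvSplit1 '\n' [] (line ++ '\n' :: rest) = line :: pvSplit1 '\n' [] rest := by
        have := pvSplit1_split '\n' line [] rest hlinefree
        simpa using this
      rw [hs]
      rw [hPL]
      rw [hsplit, List.dropLast_cons_of_ne_nil (pvSplit1_ne_nil _ _ _),
          List.flatMap_cons]
      simp only [List.flatMap_append, List.flatMap_cons]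
      rw [ih rest hrestlen hrest_ends]
      have hlast : (p0 :: ps).getLast (by simp) = (pvSplit1 '"' [] line).getLast?.getD [] := by
        rw [hps, List.getLast?_eq_some_getLast (by simp)]
        rfl
      simp only [pvLineOut, hps, List.flatten_append, List.flatten_cons, List.flatten_nil,
        List.append_nil, ← List.flatMap_def, ← hlast]
      simp [pvRenderItem]
      rw [List.getLast?_eq_some_getLast (List.cons_ne_nil p0 ps)]
      rfl

theorem pvFlattenFlatMap {α β : Type} (l : List α) (g : α → List (List β)) :
    (l.flatMap g).flatten = l.flatMap (fun x => (g x).flatten) := by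
  induction l with
  | nil => simp
  | cons a t ih => simp [List.flatMap_cons, ih]

theorem pvItemComp (ip : Int × List Char) :
    pvRenderItem (pvItem ip)
      = if PySem.Int.mod ip.1 2 != 0 then ip.2 ++ ['"'] else pvFix (ip.2 ++ ['"']) := by
  cases h : (PySem.Int.mod ip.1 2 != 0 : Bool) <;>
    simp only [pvRenderItem, pvItem, h, Bool.not_false, Bool.not_true, if_true,
      ite_true, ite_false] <;> simp

theorem pvLineOut_eq (line : List Char) :
    (PySem.List.enumerate ((PySem.Chars.splitOn line ['"']).dropLast)).map
        (fun ip => if PySem.Int.mod ip.1 2 != 0 then ip.2 ++ ['"'] else pvFix (ip.2 ++ ['"']))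
      ++ [pvFix ((PySem.List.pyGet? (PySem.Chars.splitOn line ['"']) (-1)).getD [] ++ ['\n'])]
      = pvLineOut line := by
  rw [pvSplitOn_eq, pvGetNegOne]
  simp only [pvLineOut, List.map_map]
  congr 1
  apply List.map_congr_left
  intro ip _
  rw [Function.comp_apply, pvItemComp]

theorem pvNormEnds (s0 : List Char) :
    (if s0 ≠ [] ∧ PySem.List.pyGet? s0 (-1) ≠ some '\n' then s0 ++ ['\n'] else s0) = [] ∨
    (if s0 ≠ [] ∧ PySem.List.pyGet? s0 (-1) ≠ some '\n' then s0 ++ ['\n'] else s0).getLast?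
      = some '\n' := by
  split_ifs with h
  · right; exact List.getLast?_concat
  · push_neg at h
    by_cases h0 : s0 = []
    · left; exact h0
    · right; rw [← pvGetNegOne]; exact h h0

theorem pvPorts_eq (s : List Char) (hend : s = [] ∨ s.getLast? = some '\n') :
    (s.foldl pvStepA (([] : List (Bool × List Char)), false, ([] : List Char))).1.foldl
        (fun acc chunk => acc ++ pvRenderItem chunk) []
      = PySem.Chars.join [] (((PySem.Chars.splitOn s ['\n']).dropLast).foldl (fun acc line =>
          ((PySem.List.enumerate ((PySem.Chars.splitOn line ['"']).dropLast)).foldl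
            (fun acc ip => acc ++ [if PySem.Int.mod ip.1 2 != 0 then ip.2 ++ ['"']
              else pvFix (ip.2 ++ ['"'])]) acc)
          ++ [pvFix ((PySem.List.pyGet? (PySem.Chars.splitOn line ['"']) (-1)).getD []
              ++ ['\n'])]) []) := by
  rw [pvFoldA, PySem.List.foldl_append_eq_flatMap]
  have houter : (fun (acc : List (List Char)) line =>
      ((PySem.List.enumerate ((PySem.Chars.splitOn line ['"']).dropLast)).foldl
        (fun acc ip => acc ++ [if PySem.Int.mod ip.1 2 != 0 then ip.2 ++ ['"']
          else pvFix (ip.2 ++ ['"'])]) acc)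
      ++ [pvFix ((PySem.List.pyGet? (PySem.Chars.splitOn line ['"']) (-1)).getD [] ++ ['\n'])])
      = (fun acc line => acc ++ pvLineOut line) := by
    funext acc line
    rw [PySem.List.foldl_append_singleton_eq_map, List.append_assoc, pvLineOut_eq]
  rw [houter, PySem.List.foldl_append_eq_flatMap]
  simp only [List.nil_append]
  have hjoin : ∀ (parts : List (List Char)), PySem.Chars.join [] parts = parts.flatten := by
    intro parts; rw [PySem.Chars.join, pvIntercalateNil]
  rw [hjoin, pvFlattenFlatMap, pvSplitOn_eq]
  exact pvTop s.length s le_rfl hend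


-- ===== VERDICT (by name: the statement is the Claim_ definition above) =====
theorem reformat_line_spec : Claim_equal_reformat_line := by
  unfold Claim_equal_reformat_line
  intro statement _
  unfold Spec_reformat_line reformat_line reformat_line_alt
  exact congrArg String.mk
    (pvPorts_eq _ (pvNormEnds (PySem.Chars.replace statement.toList ['\''] ['"'])))
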